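-- pv_equiv track=rewrite | github.com/pecalleja/PythonLocalDevelopment | src/codesignal/list_operations/count_min.py | solution
-- ===== SOURCE A (Python) =====
-- def solution(numbers):
--     smallest_number = float("inf")
--     smallest_counter = 0
--     for number in numbers:
--         if number < smallest_number:
--             smallest_number = number
--             smallest_counter = 1
--         elif smallest_number == number:
--             smallest_counter += 1
--     return smallest_counter
-- ===== SOURCE B (Python) =====
-- def solution(numbers):
--     if not numbers:
--         return 0
--     m = min(numbers)
--     return numbers.count(m)
-- ===== Notes on version B (the rewrite author's own statement) =====
-- stated objective: simpler
-- what changed: Replaces A's single combined minimum-and-count loop over running state with an empty guard plus two library reductions: min(numbers) then numbers.count(m).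
import Mathlib
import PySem

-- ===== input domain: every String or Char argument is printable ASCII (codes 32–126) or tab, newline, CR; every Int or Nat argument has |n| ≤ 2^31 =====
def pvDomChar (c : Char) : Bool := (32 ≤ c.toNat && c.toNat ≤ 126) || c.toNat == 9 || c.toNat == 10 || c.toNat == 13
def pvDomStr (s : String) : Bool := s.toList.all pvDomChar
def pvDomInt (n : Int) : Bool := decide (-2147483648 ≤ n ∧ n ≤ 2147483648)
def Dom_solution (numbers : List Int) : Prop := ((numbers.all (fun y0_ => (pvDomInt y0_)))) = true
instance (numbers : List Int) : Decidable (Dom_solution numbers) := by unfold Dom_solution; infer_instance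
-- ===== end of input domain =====

-- B replaces A's single combined minimum-and-count loop with an empty guard plus two
-- library reductions (min, then count); same O(n) cost, simpler decomposition.


-- ===== PORT A =====
-- smallest_number = float("inf") is modelled as `none` (every Int is < it);
-- state is (smallest_number, smallest_counter).
def solutionStep (st : Option Int × Int) (number : Int) : Option Int × Int :=
  match st.1 with
  | none => (some number, 1)
  | some s =>
      if number < s then (some number, 1)
      else if s == number then (some s, st.2 + 1)
      else st

def solution (numbers : List Int) : Int :=
  (numbers.foldl solutionStep (none, 0)).2

-- ===== PORT B =====
def solution_alt (numbers : List Int) : Int :=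
  match numbers with
  | [] => 0
  | x :: xs =>
    match PySem.List.min? (x :: xs) (fun y => y) with
    | some m => ((x :: xs).count m : Int)
    | none => 0

-- ===== PRECONDITION & SPEC =====
def Spec_solution (numbers : List Int) (out : Int) : Prop := out = solution_alt numbers
instance (numbers : List Int) (out : Int) : Decidable (Spec_solution numbers out) := by unfold Spec_solution; infer_instance

-- ===== CLAIM (what is proved, stated in full; the proofs are below) =====
def Claim_equal_solution : Prop := ∀ (numbers : List Int), Dom_solution numbers → Spec_solution numbers (solution numbers)

-- ===== LEMMAS AND PROOFS =====
theorem foldlMin_le (xs : List Int) : ∀ (m : Int), xs.foldl min m ≤ m := by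
  induction xs with
  | nil => intro m; simp
  | cons x xs ih =>
    intro m
    calc (x :: xs).foldl min m = xs.foldl min (min m x) := by rw [List.foldl_cons]
    _ ≤ min m x := ih _
    _ ≤ m := min_le_left _ _

theorem solution_loop_inv (xs : List Int) : ∀ (m c : Int),
    xs.foldl solutionStep (some m, c)
      = (some (xs.foldl min m),
         if xs.foldl min m < m then (xs.count (xs.foldl min m) : Int)
         else c + (xs.count (xs.foldl min m) : Int)) := by
  induction xs with
  | nil => intro m c; simp
  | cons x xs ih =>
    intro m c
    rw [List.foldl_cons, List.foldl_cons]
    by_cases hx : x < m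
    · rw [show solutionStep (some m, c) x = (some x, 1) by simp [solutionStep, hx],
          ih x 1, min_eq_right hx.le]
      simp only [Prod.mk.injEq]
      refine ⟨trivial, ?_⟩
      have hM : xs.foldl min x ≤ x := foldlMin_le xs x
      have hMm : xs.foldl min x < m := lt_of_le_of_lt hM hx
      rw [if_pos hMm]
      by_cases hMx : xs.foldl min x < x
      · rw [if_pos hMx]
        have hne : ¬ (x = xs.foldl min x) := by omega
        simp [List.count_cons, hne]
      · have hMeq : xs.foldl min x = x := le_antisymm hM (not_lt.mp hMx)
        rw [if_neg hMx, hMeq, List.count_cons]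
        simp
        omega
    · by_cases hex : m = x
      · subst hex
        rw [show solutionStep (some m, c) m = (some m, c + 1) by simp [solutionStep],
            ih m (c + 1), min_self]
        simp only [Prod.mk.injEq]
        refine ⟨trivial, ?_⟩
        have hM : xs.foldl min m ≤ m := foldlMin_le xs m
        by_cases hMm : xs.foldl min m < m
        · rw [if_pos hMm, if_pos hMm]
          have hne : ¬ (m = xs.foldl min m) := by omega
          simp [List.count_cons, hne]
        · have hMeq : xs.foldl min m = m := le_antisymm hM (not_lt.mp hMm)
          rw [if_neg hMm, if_neg hMm, hMeq, List.count_cons]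
          simp
          omega
      · have hbeq : (m == x) = false := by simpa using hex
        rw [show solutionStep (some m, c) x = (some m, c) by
              simp [solutionStep, hx, hbeq],
            ih m c, min_eq_left (not_lt.mp hx)]
        simp only [Prod.mk.injEq]
        refine ⟨trivial, ?_⟩
        have hM : xs.foldl min m ≤ m := foldlMin_le xs m
        have hne : ¬ (x = xs.foldl min m) := by
          have : m < x := lt_of_le_of_ne (not_lt.mp hx) hex
          omega
        by_cases hMm : xs.foldl min m < m
        · rw [if_pos hMm, if_pos hMm]
          simp [List.count_cons, hne]
        · rw [if_neg hMm, if_neg hMm]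
          simp [List.count_cons, hne]

-- ===== VERDICT (by name: the statement is the Claim_ definition above) =====
theorem solution_spec : Claim_equal_solution := by
  intro numbers _
  unfold Spec_solution solution solution_alt
  match numbers with
  | [] => rfl
  | x :: xs =>
    rw [List.foldl_cons,
        show solutionStep (none, 0) x = (some x, 1) by simp [solutionStep],
        solution_loop_inv xs x 1]
    simp only [PySem.List.min?_id_cons]
    have hM : xs.foldl min x ≤ x := foldlMin_le xs x
    by_cases hMx : xs.foldl min x < x
    · rw [if_pos hMx]
      have hne : ¬ (x = xs.foldl min x) := by omega
      simp [List.count_cons, hne]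
    · have hMeq : xs.foldl min x = x := le_antisymm hM (not_lt.mp hMx)
      rw [if_neg hMx, hMeq, List.count_cons]
      simp
      omega
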